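-- pv_equiv track=rewrite | github.com/sompongjkr/CPT-to-soiltype | src/cpt_to_soiltype/train_eval_funcs.py | augment_class_mapping_with_groups
-- ===== SOURCE A (Python) =====
-- def augment_class_mapping_with_groups(
--     class_mapping: dict[int, str],
--     group_id_mapping: dict[int, int],
--     label_group_names: list[str] | None,
-- ) -> dict[int, str]:
--     """Return a new class_mapping including names for the grouped classes.
--
--     If label_group_names is provided, it will be assigned to the new group IDs
--     in the order those IDs were created; otherwise numeric strings are used.
--     """
--     updated = dict(class_mapping) if class_mapping is not None else {}
--
--     # Determine unique new IDs in stable order by sorting by value then key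
--     new_ids_ordered = []
--     for _, new_id in sorted(group_id_mapping.items(), key=lambda kv: (kv[1], kv[0])):
--         if new_id not in new_ids_ordered:
--             new_ids_ordered.append(new_id)
--
--     for i, new_id in enumerate(new_ids_ordered):
--         if label_group_names and i < len(label_group_names):
--             updated[new_id] = label_group_names[i]
--         else:
--             updated[new_id] = str(new_id)
--     return updated
-- ===== SOURCE B (Python) =====
-- def augment_class_mapping_with_groups(
--     class_mapping,
--     group_id_mapping,
--     label_group_names,
-- ):
--     """Return a new class_mapping including names for the grouped classes.
--
--     Instead of sorting the items and deduplicating, repeatedly extract the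
--     minimum from the set of new group IDs: that visits the distinct IDs in
--     exactly the ascending order A's sort-by-(value,key) plus first-occurrence
--     dedup produces, assigning each its name as it is extracted.
--     """
--     updated = dict(class_mapping) if class_mapping is not None else {}
--     names = label_group_names or []
--     remaining = set(group_id_mapping.values())
--     i = 0
--     while remaining:
--         gid = min(remaining)
--         remaining.discard(gid)
--         updated[gid] = names[i] if i < len(names) else str(gid)
--         i += 1
--     return updated
-- ===== Notes on version B (the rewrite author's own statement) =====
-- stated objective: alternative
-- what changed: A sorts the dict items by (value,key), deduplicates by a scan-and-append loop, then assigns names in an enumerate loop; B never sorts or deduplicates a list: it puts the values in a set and repeatedly extracts the minimum, assigning each extracted ID its name on the fly in a single shrinking-set loop.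
import Mathlib
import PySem

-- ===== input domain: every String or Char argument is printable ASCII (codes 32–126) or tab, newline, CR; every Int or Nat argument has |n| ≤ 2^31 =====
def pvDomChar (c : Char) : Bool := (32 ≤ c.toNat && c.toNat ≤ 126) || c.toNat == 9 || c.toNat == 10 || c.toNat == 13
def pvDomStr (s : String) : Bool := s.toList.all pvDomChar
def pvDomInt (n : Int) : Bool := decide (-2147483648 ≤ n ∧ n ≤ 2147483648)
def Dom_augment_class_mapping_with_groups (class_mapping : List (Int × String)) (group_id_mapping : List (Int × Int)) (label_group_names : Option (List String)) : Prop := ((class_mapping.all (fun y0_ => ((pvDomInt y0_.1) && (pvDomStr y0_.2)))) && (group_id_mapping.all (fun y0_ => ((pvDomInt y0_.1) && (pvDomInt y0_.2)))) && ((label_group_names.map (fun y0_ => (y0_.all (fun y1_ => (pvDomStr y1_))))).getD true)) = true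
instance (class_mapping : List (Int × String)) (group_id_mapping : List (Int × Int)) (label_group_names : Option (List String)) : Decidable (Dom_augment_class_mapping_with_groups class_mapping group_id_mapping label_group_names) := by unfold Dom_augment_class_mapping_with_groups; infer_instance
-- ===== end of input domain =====

-- B replaces A's sort-by-(value,key) + dedup-scan + enumerate-assign pipeline by a single
-- min-extraction loop over the set of group IDs (objective: alternative algorithm).

-- ===== PORT A =====
-- literal port: 'updated = dict(class_mapping)' (the argument is a dict, never None here);
-- 'sorted(items, key=lambda kv: (kv[1], kv[0]))' is PySem.List.sorted2 with keys snd, fst;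
-- the truthiness test 'label_group_names and i < len(label_group_names)' is the match + 'nm ≠ [] ∧ …'.
def augment_class_mapping_with_groups (class_mapping : List (Int × String)) (group_id_mapping : List (Int × Int)) (label_group_names : Option (List String)) : List (Int × String) :=
  let updated : PySem.Dict Int String := PySem.Dict.ofList class_mapping
  let new_ids_ordered : List Int :=
    (PySem.List.sorted2 group_id_mapping (fun kv => kv.2) (fun kv => kv.1)).foldl
      (fun acc kv => if kv.2 ∈ acc then acc else acc ++ [kv.2]) []
  let final : PySem.Dict Int String :=
    (PySem.List.enumerate new_ids_ordered).foldl
      (fun d p => d.insert p.2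
        (match label_group_names with
         | some nm =>
             if nm ≠ [] ∧ p.1 < (nm.length : Int) then PySem.List.pyGetD nm p.1 ""
             else PySem.Int.toStr p.2
         | none => PySem.Int.toStr p.2)) updated
  final.items

-- ===== PORT B =====
-- literal port of Source B's while loop: while remaining: gid = min(remaining); remaining.discard(gid);
-- updated[gid] = names[i] if i < len(names) else str(gid); i += 1.  min(remaining) on the nonempty
-- set is PySem.List.min?; the 'while remaining' test is the 'none ↔ empty' branch of min?.
def pvAltLoop (names : List String) (remaining : PySem.Set Int) (i : Nat) (d : PySem.Dict Int String) : PySem.Dict Int String :=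
  match hm : PySem.List.min? remaining (fun x => x) with
  | none => d
  | some gid =>
      pvAltLoop names (PySem.Set.discard remaining gid) (i + 1)
        (d.insert gid (if i < names.length then names.getD i "" else PySem.Int.toStr gid))
termination_by remaining.length
decreasing_by
  simp only [PySem.Set.discard]
  exact List.length_filter_lt_length_iff_exists.mpr ⟨gid, PySem.List.min?_mem hm, by simp⟩

def augment_class_mapping_with_groups_alt (class_mapping : List (Int × String)) (group_id_mapping : List (Int × Int)) (label_group_names : Option (List String)) : List (Int × String) :=
  let updated : PySem.Dict Int String := PySem.Dict.ofList class_mapping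
  let names : List String := label_group_names.getD []   -- 'label_group_names or []'
  let remaining : PySem.Set Int := PySem.Set.ofList (group_id_mapping.map (fun kv => kv.2))
  (pvAltLoop names remaining 0 updated).items

-- ===== PRECONDITION & SPEC =====
def Spec_augment_class_mapping_with_groups (class_mapping : List (Int × String)) (group_id_mapping : List (Int × Int)) (label_group_names : Option (List String)) (out : List (Int × String)) : Prop := out = augment_class_mapping_with_groups_alt class_mapping group_id_mapping label_group_names
instance (class_mapping : List (Int × String)) (group_id_mapping : List (Int × Int)) (label_group_names : Option (List String)) (out : List (Int × String)) : Decidable (Spec_augment_class_mapping_with_groups class_mapping group_id_mapping label_group_names out) := by unfold Spec_augment_class_mapping_with_groups; infer_instance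

-- ===== CLAIM (what is proved, stated in full; the proofs are below) =====
def Claim_equal_augment_class_mapping_with_groups : Prop := ∀ (class_mapping : List (Int × String)) (group_id_mapping : List (Int × Int)) (label_group_names : Option (List String)), Dom_augment_class_mapping_with_groups class_mapping group_id_mapping label_group_names → Spec_augment_class_mapping_with_groups class_mapping group_id_mapping label_group_names (augment_class_mapping_with_groups class_mapping group_id_mapping label_group_names)

-- ===== LEMMAS AND PROOFS =====

-- insertBy with a comparator that respects the key `snd` keeps the list snd-monotone
theorem pv_insertBy_pairwise_snd (lt : Int × Int → Int × Int → Bool)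
    (h1 : ∀ a b, lt a b = true → a.2 ≤ b.2) (h2 : ∀ a b, lt a b = false → b.2 ≤ a.2)
    (x : Int × Int) (ys : List (Int × Int))
    (hys : ys.Pairwise (fun a b => a.2 ≤ b.2)) :
    (PySem.List.insertBy lt x ys).Pairwise (fun a b => a.2 ≤ b.2) := by
  induction ys with
  | nil => simp [PySem.List.insertBy]
  | cons y ys ih =>
    rw [List.pairwise_cons] at hys
    by_cases h : lt x y = true
    · simp only [PySem.List.insertBy, h, if_true]
      refine List.pairwise_cons.mpr ⟨?_, List.pairwise_cons.mpr ⟨hys.1, hys.2⟩⟩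
      intro z hz
      rcases List.mem_cons.mp hz with rfl | hz
      · exact h1 _ _ h
      · exact le_trans (h1 _ _ h) (hys.1 z hz)
    · simp only [PySem.List.insertBy, h]
      refine List.pairwise_cons.mpr ⟨?_, ih hys.2⟩
      intro z hz
      rcases (PySem.List.insertBy_mem_iff lt x z ys).mp hz with rfl | hz
      · exact h2 _ _ (by simpa using h)
      · exact hys.1 z hz

theorem pv_foldl_insertBy_pairwise_snd (lt : Int × Int → Int × Int → Bool)
    (h1 : ∀ a b, lt a b = true → a.2 ≤ b.2) (h2 : ∀ a b, lt a b = false → b.2 ≤ a.2)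
    (g : List (Int × Int)) (acc : List (Int × Int))
    (hacc : acc.Pairwise (fun a b => a.2 ≤ b.2)) :
    (g.foldl (fun acc x => PySem.List.insertBy lt x acc) acc).Pairwise (fun a b => a.2 ≤ b.2) := by
  induction g generalizing acc with
  | nil => exact hacc
  | cons x g ih => exact ih _ (pv_insertBy_pairwise_snd lt h1 h2 x acc hacc)

-- sorted(items, key=lambda kv: (kv[1], kv[0])) is nondecreasing in snd
theorem pv_sorted2_pairwise_snd (g : List (Int × Int)) :
    (PySem.List.sorted2 g (fun kv => kv.2) (fun kv => kv.1)).Pairwise (fun a b => a.2 ≤ b.2) := by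
  have hdef : PySem.List.sorted2 g (fun kv => kv.2) (fun kv => kv.1)
      = g.foldl (fun acc x => PySem.List.insertBy
          (fun a b => decide (a.2 < b.2) || (!decide (b.2 < a.2) && decide (a.1 < b.1))) x acc) [] := rfl
  rw [hdef]
  refine pv_foldl_insertBy_pairwise_snd _ ?_ ?_ g [] List.Pairwise.nil
  · intro a b h
    simp at h
    rcases h with h | ⟨h, _⟩ <;> omega
  · intro a b h
    simp at h
    obtain ⟨h1, -⟩ := h
    omega

-- dedup (first occurrences) of a nondecreasing Int list is strictly increasing
theorem pv_ofList_pairwise_lt (xs : List Int) (h : xs.Pairwise (· ≤ ·)) :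
    (PySem.Set.ofList xs).Pairwise (· < ·) := by
  induction xs with
  | nil =>
    have : PySem.Set.ofList ([] : List Int) = [] := rfl
    simp [this]
  | cons x xs ih =>
    rw [List.pairwise_cons] at h
    rw [PySem.Set.ofList_cons]
    refine List.pairwise_cons.mpr ⟨?_, ?_⟩
    · intro y hy
      unfold PySem.Set.discard at hy
      rcases List.mem_filter.mp hy with ⟨hy1, hy2⟩
      have hxy : x ≤ y := h.1 y ((PySem.Set.mem_ofList xs y).mp hy1)
      have hne : y ≠ x := by simpa using hy2
      omega
    · exact List.Pairwise.filter _ (ih h.2)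

-- A's dedup-over-sorted-items loop computes exactly sorted(set(values))
theorem pv_ids_eq (g : List (Int × Int)) :
    (PySem.List.sorted2 g (fun kv => kv.2) (fun kv => kv.1)).foldl
      (fun acc kv => if kv.2 ∈ acc then acc else acc ++ [kv.2]) []
    = PySem.List.sorted (PySem.Set.ofList (g.map (fun kv => kv.2))) (fun x => x) := by
  have hbody : (fun (acc : List Int) (kv : Int × Int) => if kv.2 ∈ acc then acc else acc ++ [kv.2])
      = fun acc kv => PySem.Set.add acc kv.2 := by
    funext acc kv
    rw [PySem.Set.add_eq_ite]
  rw [hbody, ← PySem.Set.update_map_eq_foldl_add, PySem.Set.update_nil_left]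
  refine (PySem.List.sorted_eq_of_perm_of_pairwise_lt _ _ _ ?_ ?_).symm
  · refine (List.perm_ext_iff_of_nodup (PySem.Set.nodup_ofList _) (PySem.Set.nodup_ofList _)).mpr ?_
    intro a
    rw [PySem.Set.mem_ofList, PySem.Set.mem_ofList]
    exact ((PySem.List.sorted2_perm g (fun kv => kv.2) (fun kv => kv.1) false).map (fun kv => kv.2)).mem_iff
  · exact pv_ofList_pairwise_lt _ ((List.pairwise_map).mpr (pv_sorted2_pairwise_snd g))

-- sorted of a duplicate-free list is its minimum followed by sorted of the rest
theorem pv_sorted_cons_min (S : List Int) (hn : S.Nodup) (m : Int)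
    (hm : PySem.List.min? S (fun x => x) = some m) :
    PySem.List.sorted S (fun x => x)
      = m :: PySem.List.sorted (PySem.Set.discard S m) (fun x => x) := by
  have hmem : m ∈ S := PySem.List.min?_mem hm
  have hdis : PySem.Set.discard S m = S.erase m := by
    rw [hn.erase_eq_filter m]; rfl
  refine PySem.List.sorted_eq_of_perm_of_pairwise_lt _ _ _ ?_ ?_
  · have h1 : (PySem.List.sorted (PySem.Set.discard S m) (fun x => x)).Perm (S.erase m) := by
      rw [hdis]; exact PySem.List.sorted_perm _ _ _
    exact (h1.cons m).trans (List.perm_cons_erase hmem).symm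
  · refine List.pairwise_cons.mpr ⟨?_, ?_⟩
    · intro y hy
      rw [PySem.List.mem_sorted] at hy
      have hyS : y ∈ S := by
        rw [hdis] at hy; exact List.mem_of_mem_erase hy
      have hne : y ≠ m := by
        unfold PySem.Set.discard at hy
        simpa using (List.mem_filter.mp hy).2
      have := PySem.List.min?_isMin hm y hyS
      omega
    · have hnd : (PySem.List.sorted (PySem.Set.discard S m) (fun x => x)).Nodup :=
        (PySem.List.sorted_perm _ _ _).nodup_iff.mpr (by rw [hdis]; exact hn.erase m)
      have hle : (PySem.List.sorted (PySem.Set.discard S m) (fun x => x)).Pairwise (· ≤ ·) :=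
        PySem.List.sorted_pairwise _ _
      exact (hle.and hnd).imp (fun h => lt_of_le_of_ne h.1 h.2)

-- the min-extraction loop equals A's enumerate-fold over the sorted distinct IDs
theorem pv_loop_eq (names : List String) : ∀ (n : Nat) (S : List Int), S.length ≤ n → S.Nodup →
    ∀ (i : Nat) (d : PySem.Dict Int String),
    pvAltLoop names S i d
      = (PySem.List.enumerate (PySem.List.sorted S (fun x => x)) (i : Int)).foldl
          (fun d p => d.insert p.2
            (if names ≠ [] ∧ p.1 < (names.length : Int) then PySem.List.pyGetD names p.1 ""
             else PySem.Int.toStr p.2)) d := by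
  intro n
  induction n with
  | zero =>
    intro S hlen _ i d
    have hS : S = [] := List.eq_nil_of_length_eq_zero (Nat.le_zero.mp hlen)
    subst hS
    rw [pvAltLoop]
    rfl
  | succ n ih =>
    intro S hlen hnd i d
    rw [pvAltLoop.eq_def]
    split
    · rename_i hS
      have : S = [] := (PySem.List.min?_eq_none_iff S _).mp hS
      subst this
      rfl
    · rename_i m hS
      have hmem : m ∈ S := PySem.List.min?_mem hS
      have hlt : (PySem.Set.discard S m).length < S.length := by
        simp only [PySem.Set.discard]
        exact List.length_filter_lt_length_iff_exists.mpr ⟨m, hmem, by simp⟩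
      have hnd' : (PySem.Set.discard S m).Nodup := hnd.filter _
      rw [pv_sorted_cons_min S hnd m hS, PySem.List.enumerate_cons, List.foldl_cons]
      have hval : (if names ≠ [] ∧ (i : Int) < (names.length : Int)
            then PySem.List.pyGetD names (i : Int) "" else PySem.Int.toStr m)
          = (if i < names.length then names.getD i "" else PySem.Int.toStr m) := by
        by_cases h : i < names.length
        · rw [if_pos h, if_pos ⟨by intro hnil; simp [hnil] at h, by exact_mod_cast h⟩]
          rw [PySem.List.pyGetD_natCast]
        · rw [if_neg h, if_neg ?_]
          rintro ⟨-, hlt'⟩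
          exact h (by exact_mod_cast hlt')
      rw [ih (PySem.Set.discard S m) (by omega) hnd' (i + 1) _ ]
      simp only [hval, Nat.cast_add, Nat.cast_one]

-- ===== VERDICT (by name: the statement is the Claim_ definition above) =====
theorem augment_class_mapping_with_groups_spec : Claim_equal_augment_class_mapping_with_groups := by
  intro cm gim lgn _
  unfold Spec_augment_class_mapping_with_groups
  simp only [augment_class_mapping_with_groups, augment_class_mapping_with_groups_alt]
  rw [pv_ids_eq]
  cases lgn with
  | none =>
    simp only [Option.getD_none]
    rw [pv_loop_eq ([] : List String)
        (PySem.Set.ofList (gim.map (fun kv => kv.2))).length _ le_rfl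
        (PySem.Set.nodup_ofList _) 0 (PySem.Dict.ofList cm)]
    simp
  | some nm =>
    simp only [Option.getD_some]
    rw [pv_loop_eq nm (PySem.Set.ofList (gim.map (fun kv => kv.2))).length _ le_rfl
        (PySem.Set.nodup_ofList _) 0 (PySem.Dict.ofList cm)]
    simp
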